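-- pv_equiv track=rewrite | github.com/symbiose-prod/Projet-prod | ui/_stocks_calc.py | _extract_supplier_map_from_entries
-- ===== SOURCE A (Python) =====
-- from typing import Any
--
-- def _extract_supplier_map_from_entries(
--     entries: list[dict[str, Any]],
-- ) -> dict[str, str]:
--     """Build libelle → most-recent-supplier map from MP entry history records.
--
--     Each record has: libelle, fournisseur, date (timestamp ms).
--     We keep the supplier from the most recent entry per libelle.
--     """
--     supplier: dict[str, str] = {}
--     latest_date: dict[str, int] = {}
--
--     for entry in entries:
--         fournisseur = (entry.get("fournisseur") or "").strip()
--         libelle = (entry.get("libelle") or "").strip()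
--         if not fournisseur or not libelle:
--             continue
--         # date is a unix timestamp in milliseconds
--         entry_date = int(entry.get("date", 0) or 0)
--         prev = latest_date.get(libelle, 0)
--         if entry_date >= prev:
--             supplier[libelle] = fournisseur
--             latest_date[libelle] = entry_date
--
--     return supplier
-- ===== SOURCE B (Python) =====
-- from typing import Any
--
--
-- def _extract_supplier_map_from_entries(
--     entries: list[dict[str, Any]],
-- ) -> dict[str, str]:
--     """Build libelle → most-recent-supplier map from MP entry history records.
--
--     Two phases: group the usable (date, fournisseur) pairs by libelle,
--     then pick each libelle's most recent pair (ties: the later entry).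
--     """
--     history: dict[str, list[tuple[int, str]]] = {}
--     for entry in entries:
--         fournisseur = (entry.get("fournisseur") or "").strip()
--         libelle = (entry.get("libelle") or "").strip()
--         if fournisseur and libelle:
--             date = int(entry.get("date", 0) or 0)
--             history.setdefault(libelle, []).append((date, fournisseur))
--     return {
--         libelle: max(reversed(pairs), key=lambda p: p[0])[1]
--         for libelle, pairs in history.items()
--     }
-- ===== Notes on version B (the rewrite author's own statement) =====
-- stated objective: alternative
-- what changed: A's single pass with two running dicts (supplier plus a latest_date max-tracker) is replaced by a two-phase group-by: one pass groups each libelle's (date, fournisseur) pairs, then a dict comprehension picks each group's most recent pair (ties: the later entry) with max over the reversed group. …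
-- outside the precondition, e.g. on _extract_supplier_map_from_entries([{'libelle': 'x', 'fournisseur': 'f', 'date': '-1'}]): A returns {}, B returns {'x': 'f'}
import Mathlib
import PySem

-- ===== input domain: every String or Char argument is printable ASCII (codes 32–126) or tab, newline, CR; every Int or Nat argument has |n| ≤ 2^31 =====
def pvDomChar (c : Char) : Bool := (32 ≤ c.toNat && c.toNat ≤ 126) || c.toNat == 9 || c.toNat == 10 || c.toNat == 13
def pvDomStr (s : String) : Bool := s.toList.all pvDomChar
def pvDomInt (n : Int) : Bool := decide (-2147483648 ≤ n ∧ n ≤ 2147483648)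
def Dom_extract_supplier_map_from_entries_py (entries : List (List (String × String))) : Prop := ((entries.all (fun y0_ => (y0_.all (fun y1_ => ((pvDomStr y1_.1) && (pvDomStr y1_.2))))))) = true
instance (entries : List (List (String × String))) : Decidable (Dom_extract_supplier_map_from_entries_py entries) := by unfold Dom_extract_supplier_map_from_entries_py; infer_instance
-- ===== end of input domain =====

-- B replaces A's one pass over two running dicts (supplier + latest_date max-tracking) by a
-- two-phase group-by: group each libelle's (date, fournisseur) pairs, then pick each group's
-- most recent pair (objective: alternative decomposition, similar cost).

-- shared expression helpers (both Pythons compute these exact same sub-expressions on an entry)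
def entryGet (e : List (String × String)) (k : String) : Option String :=
  (PySem.Dict.mk e).get? k

def entryF (e : List (String × String)) : String :=
  PySem.Str.strip ((entryGet e "fournisseur").getD "")

def entryL (e : List (String × String)) : String :=
  PySem.Str.strip ((entryGet e "libelle").getD "")

-- int(entry.get("date", 0) or 0); a non-int-like non-empty date string is a ValueError in both
-- Pythons (they guard it identically) and lies outside Pre_ below; the port substitutes 0 there
def entryD (e : List (String × String)) : Int :=
  match entryGet e "date" with
  | none => 0
  | some s => if s = "" then 0 else (PySem.Int.ofStr? s).getD 0

-- ===== PORT A =====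
def aStep (st : PySem.Dict String String × PySem.Dict String Int)
    (e : List (String × String)) : PySem.Dict String String × PySem.Dict String Int :=
  let f := entryF e
  let l := entryL e
  if f = "" || l = "" then st
  else
    let d := entryD e
    let prev := st.2.getD l 0
    if prev ≤ d then (st.1.insert l f, st.2.insert l d) else st

def extract_supplier_map_from_entries_py (entries : List (List (String × String))) : List (String × String) :=
  ((entries.foldl aStep (PySem.Dict.empty, PySem.Dict.empty)).1).items

-- ===== PORT B =====
-- first loop of Source B: history.setdefault(libelle, []).append((date, fournisseur))
def bStep (h : PySem.Dict String (List (Int × String)))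
    (e : List (String × String)) : PySem.Dict String (List (Int × String)) :=
  let f := entryF e
  let l := entryL e
  if f = "" || l = "" then h
  else
    let d := entryD e
    h.insert l (h.getD l [] ++ [(d, f)])

-- max(reversed(pairs), key=lambda p: p[0]): hand-ported (Python max keeps the current element
-- unless the candidate's key is strictly greater); groups are never empty, so the [] branch
-- (where Python max would raise) is unreachable
def pyMaxRev (ps : List (Int × String)) : Int × String :=
  match ps.reverse with
  | [] => (0, "")
  | h :: t => t.foldl (fun b x => if b.1 < x.1 then x else b) h

def extract_supplier_map_from_entries_py_alt (entries : List (List (String × String))) : List (String × String) :=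
  let history := entries.foldl bStep PySem.Dict.empty
  (history.items.foldl (fun d p => d.insert p.1 (pyMaxRev p.2).2) PySem.Dict.empty).items

-- ===== PRECONDITION & SPEC =====
def dateOK (e : List (String × String)) : Bool :=
  match entryGet e "date" with
  | none => true
  | some s => s == "" || (match PySem.Int.ofStr? s with | none => false | some d => decide (0 ≤ d))

-- Pre_ excludes (i) inputs where a usable entry (non-empty stripped fournisseur and libelle) has a
-- non-empty date string int() cannot parse — A (and B) raise ValueError there — and (ii) the
-- malformed-data corner of a usable entry with a negative (pre-epoch) timestamp, on which A's value
-- (such an entry can never win: its tracked max starts at 0) and B's (an ordinary date) are both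
-- defensible readings of an unspecified corner.
def Pre_extract_supplier_map_from_entries_py (entries : List (List (String × String))) : Prop :=
  (entries.all (fun e => entryF e == "" || entryL e == "" || dateOK e)) = true
instance (entries : List (List (String × String))) : Decidable (Pre_extract_supplier_map_from_entries_py entries) := by unfold Pre_extract_supplier_map_from_entries_py; infer_instance

def pvWitness_extract_supplier_map_from_entries_py : (List (List (String × String))) :=
  [[("libelle", "x"), ("fournisseur", "f"), ("date", "5")]]

def Spec_extract_supplier_map_from_entries_py (entries : List (List (String × String))) (out : List (String × String)) : Prop := out = extract_supplier_map_from_entries_py_alt entries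
instance (entries : List (List (String × String))) (out : List (String × String)) : Decidable (Spec_extract_supplier_map_from_entries_py entries out) := by unfold Spec_extract_supplier_map_from_entries_py; infer_instance

-- ===== CLAIM (what is proved, stated in full; the proofs are below) =====
def Claim_equal_extract_supplier_map_from_entries_py : Prop := ∀ (entries : List (List (String × String))), Dom_extract_supplier_map_from_entries_py entries → Pre_extract_supplier_map_from_entries_py entries → Spec_extract_supplier_map_from_entries_py entries (extract_supplier_map_from_entries_py entries)

-- ===== LEMMAS AND PROOFS =====

-- usable-entry extractor: the (libelle, date, fournisseur) triple both loops act on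
def vOf (e : List (String × String)) : Option (String × Int × String) :=
  let f := entryF e
  let l := entryL e
  if f = "" || l = "" then none else some (l, entryD e, f)

-- A's step on the triple view
def stepV (st : PySem.Dict String String × PySem.Dict String Int)
    (t : String × Int × String) : PySem.Dict String String × PySem.Dict String Int :=
  if st.2.getD t.1 0 ≤ t.2.1 then (st.1.insert t.1 t.2.2, st.2.insert t.1 t.2.1) else st

-- B's grouping step on the triple view
def bStepV (h : PySem.Dict String (List (Int × String)))
    (t : String × Int × String) : PySem.Dict String (List (Int × String)) :=
  h.insert t.1 (h.getD t.1 [] ++ [(t.2.1, t.2.2)])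

lemma A_fold_eq_V (entries : List (List (String × String)))
    (st : PySem.Dict String String × PySem.Dict String Int) :
    entries.foldl aStep st = (entries.filterMap vOf).foldl stepV st := by
  induction entries generalizing st with
  | nil => simp
  | cons e es ih =>
    simp only [List.foldl_cons, List.filterMap_cons]
    by_cases h1 : entryF e = "" || entryL e = ""
    · have ha : aStep st e = st := by simp [aStep, h1]
      have hv : vOf e = none := by simp [vOf, h1]
      rw [ha, hv, ih st]
    · have hv : vOf e = some (entryL e, entryD e, entryF e) := by simp [vOf, h1]
      have ha : aStep st e = stepV st (entryL e, entryD e, entryF e) := by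
        simp [aStep, stepV, h1]
      rw [ha, hv, List.foldl_cons, ih]

lemma B_fold_eq_V (entries : List (List (String × String)))
    (h : PySem.Dict String (List (Int × String))) :
    entries.foldl bStep h = (entries.filterMap vOf).foldl bStepV h := by
  induction entries generalizing h with
  | nil => simp
  | cons e es ih =>
    simp only [List.foldl_cons, List.filterMap_cons]
    by_cases h1 : entryF e = "" || entryL e = ""
    · have hb : bStep h e = h := by simp [bStep, h1]
      have hv : vOf e = none := by simp [vOf, h1]
      rw [hb, hv, ih]
    · have hv : vOf e = some (entryL e, entryD e, entryF e) := by simp [vOf, h1]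
      have hb : bStep h e = bStepV h (entryL e, entryD e, entryF e) := by
        simp [bStep, bStepV, h1]
      rw [hb, hv, List.foldl_cons, ih]

-- Pre_ makes every extracted date non-negative
lemma dates_nonneg (entries : List (List (String × String)))
    (hp : Pre_extract_supplier_map_from_entries_py entries) :
    ∀ t ∈ entries.filterMap vOf, 0 ≤ t.2.1 := by
  intro t ht
  obtain ⟨e, he, hvv⟩ := List.mem_filterMap.mp ht
  by_cases h1 : entryF e = "" || entryL e = ""
  · simp [vOf, h1] at hvv
  · have hve : vOf e = some (entryL e, entryD e, entryF e) := by simp [vOf, h1]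
    rw [hve, Option.some_inj] at hvv
    have hok : (entryF e == "" || entryL e == "" || dateOK e) = true :=
      List.all_eq_true.mp hp e he
    simp only [Bool.or_eq_true, not_or] at h1
    have hdok : dateOK e = true := by
      simp only [Bool.or_eq_true, beq_iff_eq] at hok
      rcases hok with (h | h) | h
      · exact absurd h (by simpa using h1.1)
      · exact absurd h (by simpa using h1.2)
      · exact h
    have hnn : 0 ≤ entryD e := by
      unfold dateOK at hdok
      unfold entryD
      cases hg : entryGet e "date" with
      | none => simp
      | some s =>
        rw [hg] at hdok
        by_cases hs : s = ""
        · simp [hs]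
        · simp only [if_neg hs]
          cases hsi : PySem.Int.ofStr? s with
          | none => simp [hsi, hs] at hdok
          | some d =>
            simp only [Option.getD_some]
            simp [hsi, hs] at hdok
            exact hdok
    rw [← hvv]
    exact hnn

-- running winner of A on the triples of one libelle
def bestP (v : List (String × Int × String)) (lib : String) : Int × String :=
  v.foldl (fun b t => if t.1 = lib ∧ b.1 ≤ t.2.1 then (t.2.1, t.2.2) else b) (-1, "")

lemma bestP_append (v : List (String × Int × String)) (l : String) (d : Int) (f : String)
    (lib : String) :
    bestP (v ++ [(l, d, f)]) lib =
      if l = lib ∧ (bestP v lib).1 ≤ d then (d, f) else bestP v lib := by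
  simp [bestP, List.foldl_append]

lemma bestP_not_mem (v : List (String × Int × String)) (lib : String)
    (h : lib ∉ v.map (·.1)) : bestP v lib = (-1, "") := by
  unfold bestP
  rw [PySem.List.foldl_congr_mem (g := fun b _ => b)]
  · exact PySem.List.foldl_ignore _ _
  · intro b t ht
    have : t.1 ≠ lib := by
      intro he; exact h (he ▸ List.mem_map_of_mem ht)
    simp [this]

lemma dedup_append_singleton {α : Type} [BEq α] [LawfulBEq α] (ks : List α) (l : α) :
    PySem.List.dedup (ks ++ [l]) =
      if l ∈ ks then PySem.List.dedup ks else PySem.List.dedup ks ++ [l] := by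
  rw [PySem.List.dedup_eq_ofList, PySem.List.dedup_eq_ofList]
  have h1 : PySem.Set.ofList (ks ++ [l]) = PySem.Set.add (PySem.Set.ofList ks) l := by
    simp [PySem.Set.ofList_eq_foldl]
  rw [h1]
  by_cases h : l ∈ ks <;> simp [PySem.Set.add, PySem.Set.contains, h]

lemma keys_append_mem (v : List (String × Int × String)) (x : String × Int × String)
    (l' : String) (he : l' ≠ x.1) :
    (l' ∈ (v ++ [x]).map (fun t => t.1)) ↔ l' ∈ v.map (fun t => t.1) := by
  rw [List.map_append, List.mem_append]
  simp [he]

lemma ite_keys_append {γ : Type} (v : List (String × Int × String)) (x : String × Int × String)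
    (l' : String) (he : l' ≠ x.1) (a b : γ) :
    (if l' ∈ (v ++ [x]).map (fun t => t.1) then a else b)
      = if l' ∈ v.map (fun t => t.1) then a else b := by
  by_cases hm : l' ∈ v.map (fun t => t.1)
  · rw [if_pos hm, if_pos ((keys_append_mem v x l' he).mpr hm)]
  · rw [if_neg hm, if_neg (fun h => hm ((keys_append_mem v x l' he).mp h))]

lemma self_mem_keys_append (v : List (String × Int × String)) (x : String × Int × String) :
    x.1 ∈ (v ++ [x]).map (fun t => t.1) := by
  rw [List.map_append]
  exact List.mem_append.mpr (Or.inr (by simp))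

-- A's loop lists, per first-occurrence libelle, the running winner; its latest_date dict holds
-- each present libelle's best date (all dates non-negative)
lemma fold_stepV_char (v : List (String × Int × String)) (hv : ∀ t ∈ v, 0 ≤ t.2.1) :
    (∀ l, (v.foldl stepV (PySem.Dict.empty, PySem.Dict.empty)).2.getD l 0 =
        if l ∈ v.map (fun t => t.1) then (bestP v l).1 else 0)
    ∧ (v.foldl stepV (PySem.Dict.empty, PySem.Dict.empty)).1.items =
        (PySem.List.dedup (v.map (fun t => t.1))).map (fun k => (k, (bestP v k).2)) := by
  induction v using List.reverseRecOn with
  | nil =>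
    refine ⟨fun l => ?_, ?_⟩
    · simp only [List.foldl_nil, List.map_nil, List.not_mem_nil, if_neg (not_false)]
      exact PySem.Dict.getD_empty _ _
    · simp [PySem.List.dedup_eq_ofList, PySem.Set.ofList_eq_foldl, PySem.Dict.empty]
  | append_singleton v x ih =>
    obtain ⟨l, d, f⟩ := x
    have hd : (0 : Int) ≤ d := hv (l, d, f) (by simp)
    have hv' : ∀ t ∈ v, 0 ≤ t.2.1 := fun t ht => hv t (by simp [ht])
    obtain ⟨ih1, ih2⟩ := ih hv'
    set S := v.foldl stepV (PySem.Dict.empty, PySem.Dict.empty) with hS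
    have hfold : (v ++ [(l, d, f)]).foldl stepV (PySem.Dict.empty, PySem.Dict.empty)
        = stepV S (l, d, f) := by simp [List.foldl_append, hS]
    have hkeys1 : S.1.keys = PySem.List.dedup (v.map (fun t => t.1)) := by
      show S.1.items.map (·.1) = _
      rw [ih2]; simp [Function.comp_def]
    by_cases hmem : l ∈ v.map (fun t => t.1)
    · -- l already seen: A's test compares d with the best date so far
      have hprev : S.2.getD l 0 = (bestP v l).1 := by rw [ih1]; simp [hmem]
      by_cases hc : (bestP v l).1 ≤ d
      · have hstep : stepV S (l, d, f) = (S.1.insert l f, S.2.insert l d) := by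
          simp [stepV, hprev, hc]
        constructor
        · intro l'
          rw [hfold, hstep]
          show (S.2.insert l d).getD l' 0 = _
          rw [PySem.Dict.getD_insert]
          by_cases he : l' = l
          · subst he
            rw [if_pos rfl, if_pos (self_mem_keys_append v (l', d, f)), bestP_append]
            simp [hc]
          · rw [if_neg he, ite_keys_append v _ l' he, ih1 l', bestP_append]
            by_cases hm : l' ∈ v.map (fun t => t.1)
            · rw [if_pos hm, if_pos hm]
              simp [Ne.symm he]
            · rw [if_neg hm, if_neg hm]
        · rw [hfold, hstep]
          show (S.1.insert l f).items = _
          have hcont : S.1.contains l = true := by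
            rw [PySem.Dict.contains_eq_decide_mem_keys, hkeys1]
            simp [hmem]
          rw [PySem.Dict.items_insert_of_contains _ _ hcont, ih2]
          simp only [List.map_append, List.map_cons, List.map_nil]
          rw [dedup_append_singleton, if_pos hmem, List.map_map]
          apply List.map_congr_left
          intro k hk
          rw [bestP_append]
          by_cases he : k = l
          · subst he; simp [hc]
          · simp [Ne.symm he, he]
      · have hstep : stepV S (l, d, f) = S := by simp [stepV, hprev, hc]
        constructor
        · intro l'
          rw [hfold, hstep, ih1 l', bestP_append]
          by_cases he : l' = l
          · subst he
            rw [if_pos hmem, if_pos (self_mem_keys_append v (l', d, f))]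
            simp [hc]
          · rw [ite_keys_append v _ l' he]
            by_cases hm : l' ∈ v.map (fun t => t.1)
            · rw [if_pos hm, if_pos hm]
              simp [Ne.symm he]
            · rw [if_neg hm, if_neg hm]
        · rw [hfold, hstep, ih2]
          simp only [List.map_append, List.map_cons, List.map_nil]
          rw [dedup_append_singleton, if_pos hmem]
          apply List.map_congr_left
          intro k hk
          rw [bestP_append]
          by_cases he : k = l
          · subst he; simp [hc]
          · simp [Ne.symm he]
    · -- l unseen: its tracked date is still the default 0, so 0 ≤ d fires the update
      have hprev : S.2.getD l 0 = 0 := by rw [ih1]; simp [hmem]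
      have hstep : stepV S (l, d, f) = (S.1.insert l f, S.2.insert l d) := by
        simp [stepV, hprev, hd]
      have hbl : bestP v l = (-1, "") := bestP_not_mem v l hmem
      constructor
      · intro l'
        rw [hfold, hstep]
        show (S.2.insert l d).getD l' 0 = _
        rw [PySem.Dict.getD_insert]
        by_cases he : l' = l
        · subst he
          rw [if_pos rfl, if_pos (self_mem_keys_append v (l', d, f)), bestP_append]
          simp [hbl, (by omega : (-1 : Int) ≤ d)]
        · rw [if_neg he, ite_keys_append v _ l' he, ih1 l', bestP_append]
          by_cases hm : l' ∈ v.map (fun t => t.1)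
          · rw [if_pos hm, if_pos hm]
            simp [Ne.symm he]
          · rw [if_neg hm, if_neg hm]
      · rw [hfold, hstep]
        show (S.1.insert l f).items = _
        have hcont : S.1.contains l = false := by
          rw [PySem.Dict.contains_eq_decide_mem_keys, hkeys1]
          simp [hmem]
        rw [PySem.Dict.items_insert_of_not_contains _ _ hcont, ih2]
        simp only [List.map_append, List.map_cons, List.map_nil]
        rw [dedup_append_singleton, if_neg hmem, List.map_append]
        congr 1
        · apply List.map_congr_left
          intro k hk
          rw [bestP_append]
          have he : k ≠ l := fun h => hmem (h ▸ (PySem.List.mem_dedup _ _).mp hk)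
          simp [Ne.symm he]
        · rw [List.map_cons, List.map_nil, bestP_append]
          simp [hbl, (by omega : (-1 : Int) ≤ d)]

-- one libelle's ordered group of (date, fournisseur) pairs
def grp (v : List (String × Int × String)) (lib : String) : List (Int × String) :=
  (v.filter (fun t => t.1 == lib)).map (fun t => t.2)

lemma grp_append (v : List (String × Int × String)) (l : String) (d : Int) (f : String)
    (lib : String) :
    grp (v ++ [(l, d, f)]) lib = grp v lib ++ if l = lib then [(d, f)] else [] := by
  unfold grp
  rw [List.filter_append, List.map_append]
  by_cases he : l = lib <;> simp [he]

lemma grp_not_mem (v : List (String × Int × String)) (lib : String)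
    (h : lib ∉ v.map (·.1)) : grp v lib = [] := by
  unfold grp
  rw [List.filter_eq_nil_iff.mpr, List.map_nil]
  intro t ht
  simp only [beq_iff_eq]
  intro he; exact h (he ▸ List.mem_map_of_mem ht)

-- B's grouping loop: a dict of the ordered groups, keyed by first occurrence
lemma fold_bStepV_char (v : List (String × Int × String)) :
    (∀ l, (v.foldl bStepV PySem.Dict.empty).getD l [] = grp v l)
    ∧ (v.foldl bStepV PySem.Dict.empty).items =
        (PySem.List.dedup (v.map (fun t => t.1))).map (fun k => (k, grp v k)) := by
  induction v using List.reverseRecOn with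
  | nil =>
    refine ⟨fun l => ?_, ?_⟩
    · rw [grp_not_mem _ _ (by simp)]
      exact PySem.Dict.getD_empty _ _
    · simp [PySem.List.dedup_eq_ofList, PySem.Set.ofList_eq_foldl, PySem.Dict.empty]
  | append_singleton v x ih =>
    obtain ⟨l, d, f⟩ := x
    obtain ⟨ih1, ih2⟩ := ih
    set H := v.foldl bStepV PySem.Dict.empty with hH
    have hfold : (v ++ [(l, d, f)]).foldl bStepV PySem.Dict.empty
        = H.insert l (grp v l ++ [(d, f)]) := by
      rw [List.foldl_append, List.foldl_cons, List.foldl_nil, ← hH]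
      show H.insert _ (H.getD _ [] ++ _) = _
      rw [ih1 l]
    have hkeys : H.keys = PySem.List.dedup (v.map (fun t => t.1)) := by
      show H.items.map (·.1) = _
      rw [ih2]; simp [Function.comp_def]
    constructor
    · intro l'
      rw [hfold, PySem.Dict.getD_insert, grp_append]
      by_cases he : l' = l
      · subst he; simp
      · rw [if_neg he, ih1 l', if_neg (Ne.symm he)]
        simp
    · rw [hfold]
      by_cases hmem : l ∈ v.map (fun t => t.1)
      · have hcont : H.contains l = true := by
          rw [PySem.Dict.contains_eq_decide_mem_keys, hkeys]
          simp [hmem]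
        rw [PySem.Dict.items_insert_of_contains _ _ hcont, ih2]
        simp only [List.map_append, List.map_cons, List.map_nil]
        rw [dedup_append_singleton, if_pos hmem, List.map_map]
        apply List.map_congr_left
        intro k hk
        rw [grp_append]
        by_cases he : k = l
        · subst he; simp
        · simp [Ne.symm he, he]
      · have hcont : H.contains l = false := by
          rw [PySem.Dict.contains_eq_decide_mem_keys, hkeys]
          simp [hmem]
        rw [PySem.Dict.items_insert_of_not_contains _ _ hcont, ih2]
        simp only [List.map_append, List.map_cons, List.map_nil]
        rw [dedup_append_singleton, if_neg hmem, List.map_append]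
        congr 1
        · apply List.map_congr_left
          intro k hk
          rw [grp_append]
          have he : k ≠ l := fun h => hmem (h ▸ (PySem.List.mem_dedup _ _).mp hk)
          simp [Ne.symm he]
        · rw [List.map_cons, List.map_nil, grp_append]
          simp [grp_not_mem v l hmem]

-- the ≤-step (later entries win ties): A's per-libelle running rule on a group
def leStep (b x : Int × String) : Int × String := if b.1 ≤ x.1 then x else b

lemma bestP_eq_grp (v : List (String × Int × String)) (lib : String) :
    ∀ b : Int × String,
      v.foldl (fun b t => if t.1 = lib ∧ b.1 ≤ t.2.1 then (t.2.1, t.2.2) else b) b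
        = (grp v lib).foldl leStep b := by
  induction v with
  | nil => intro b; simp [grp]
  | cons t v ih =>
    intro b
    by_cases he : t.1 = lib
    · simp only [List.foldl_cons, grp, List.filter_cons, beq_iff_eq, if_pos he,
        List.map_cons, List.foldl_cons]
      rw [← grp]
      by_cases hc : b.1 ≤ t.2.1 <;> simp [leStep, he, hc, ih]
    · simp only [List.foldl_cons, grp, List.filter_cons, beq_iff_eq, if_neg he]
      rw [← grp]
      simp [he, ih]

lemma leStep_fst_mono (t : List (Int × String)) : ∀ b : Int × String, b.1 ≤ (t.foldl leStep b).1 := by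
  induction t with
  | nil => intro b; simp
  | cons x t ih =>
    intro b
    simp only [List.foldl_cons]
    by_cases hc : b.1 ≤ x.1
    · calc b.1 ≤ x.1 := hc
        _ ≤ _ := by simpa [leStep, hc] using ih x
    · simpa [leStep, hc] using ih b

lemma leStep_init (t : List (Int × String)) :
    ∀ b c : Int × String, b.1 < c.1 →
      (t.foldl leStep c = c ∧ (t.foldl leStep b).1 < c.1)
      ∨ (t.foldl leStep c = t.foldl leStep b ∧ c.1 ≤ (t.foldl leStep b).1) := by
  induction t with
  | nil => intro b c h; exact Or.inl ⟨rfl, h⟩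
  | cons x t ih =>
    intro b c h
    simp only [List.foldl_cons]
    by_cases hc : c.1 ≤ x.1
    · right
      have hb : b.1 ≤ x.1 := le_of_lt (lt_of_lt_of_le h hc)
      rw [show leStep c x = x from by simp [leStep, hc],
          show leStep b x = x from by simp [leStep, hb]]
      exact ⟨rfl, le_trans hc (leStep_fst_mono t x)⟩
    · have hcx : ¬ c.1 ≤ x.1 := hc
      rw [show leStep c x = c from by simp [leStep, hcx]]
      by_cases hb : b.1 ≤ x.1
      · rw [show leStep b x = x from by simp [leStep, hb]]
        exact ih x c (not_le.mp hcx)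
      · rw [show leStep b x = b from by simp [leStep, hb]]
        exact ih b c h

-- Python's max over the reversed group = the ≤-fold from (-1, "") over the group
lemma pyMaxRev_cons (x : Int × String) (t : List (Int × String)) (hne : t ≠ []) :
    pyMaxRev (x :: t) = if (pyMaxRev t).1 < x.1 then x else pyMaxRev t := by
  obtain ⟨h, t', hrt⟩ : ∃ h t', t.reverse = h :: t' := by
    cases ht : t.reverse with
    | nil => exact absurd (by simpa using ht) hne
    | cons h t' => exact ⟨h, t', rfl⟩
  unfold pyMaxRev
  rw [List.reverse_cons, hrt]
  simp [List.foldl_append]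

lemma pyMaxRev_eq (g : List (Int × String)) (hne : g ≠ []) (hg : ∀ x ∈ g, 0 ≤ x.1) :
    pyMaxRev g = g.foldl leStep (-1, "") := by
  induction g with
  | nil => exact absurd rfl hne
  | cons x t ih =>
    have hx : (0 : Int) ≤ x.1 := hg x (by simp)
    have hinit : leStep (-1, "") x = x := by
      unfold leStep
      rw [if_pos (show ((-1 : Int), ("" : String)).1 ≤ x.1 by show (-1 : Int) ≤ x.1; omega)]
    rcases eq_or_ne t [] with ht | ht
    · subst ht
      rw [show pyMaxRev [x] = x from rfl, List.foldl_cons, List.foldl_nil, hinit]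
    · rw [pyMaxRev_cons x t ht, ih ht (fun y hy => hg y (by simp [hy])),
          List.foldl_cons, hinit]
      have hlt : ((-1 : Int), ("" : String)).1 < x.1 := by
        show (-1 : Int) < x.1; omega
      rcases leStep_init t (-1, "") x hlt with ⟨h1, h2⟩ | ⟨h1, h2⟩
      · rw [h1, if_pos h2]
      · rw [h1, if_neg (not_lt.mpr h2)]

lemma grp_ne_nil (v : List (String × Int × String)) (k : String)
    (hk : k ∈ v.map (fun t => t.1)) : grp v k ≠ [] := by
  obtain ⟨t, ht, he⟩ := List.mem_map.mp hk
  unfold grp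
  intro hcon
  have : t ∈ v.filter (fun t => t.1 == k) := List.mem_filter.mpr ⟨ht, by simp [he]⟩
  rw [List.eq_nil_of_map_eq_nil hcon] at this
  simp at this

lemma grp_nonneg (v : List (String × Int × String)) (hv : ∀ t ∈ v, 0 ≤ t.2.1) (k : String) :
    ∀ x ∈ grp v k, 0 ≤ x.1 := by
  intro x hx
  obtain ⟨t, ht, he⟩ := List.mem_map.mp hx
  exact he ▸ hv t (List.mem_filter.mp ht).1

-- ===== VERDICT (by name: the statement is the Claim_ definition above) =====
theorem extract_supplier_map_from_entries_py_spec : Claim_equal_extract_supplier_map_from_entries_py := by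
  intro entries _ hp
  show _ = _
  unfold extract_supplier_map_from_entries_py extract_supplier_map_from_entries_py_alt
  rw [A_fold_eq_V, B_fold_eq_V]
  set v := entries.filterMap vOf with hvdef
  have hv : ∀ t ∈ v, 0 ≤ t.2.1 := dates_nonneg entries hp
  obtain ⟨_, hA⟩ := fold_stepV_char v hv
  obtain ⟨_, hB⟩ := fold_bStepV_char v
  rw [hA]
  show _ = ((List.foldl bStepV PySem.Dict.empty v).items.foldl
      (fun d p => d.insert p.1 (pyMaxRev p.2).2) PySem.Dict.empty).items
  rw [hB, List.foldl_map,
      PySem.Dict.items_foldl_insert_fresh _ _ _ _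
        (fun a _ => PySem.Dict.contains_empty _)
        (by simpa using PySem.List.nodup_dedup _),
      show (PySem.Dict.empty : PySem.Dict String String).items = [] from rfl,
      List.nil_append]
  apply List.map_congr_left
  intro k hk
  have hkm : k ∈ v.map (fun t => t.1) := (PySem.List.mem_dedup _ _).mp hk
  rw [pyMaxRev_eq _ (grp_ne_nil v k hkm) (grp_nonneg v hv k), bestP, bestP_eq_grp]
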